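-- pv_equiv track=rewrite | github.com/rizkyprilian/purwadhika-datascience-0804 | Module1-PythonProgramming/dictionary-homework.py | displayReservedSeat
-- ===== SOURCE A (Python) =====
-- txtColorWarning = '\033[93m'
--
-- txtColorGreen = '\033[92m'
--
-- txtEndColor = '\033[0m'
--
-- def getRemainingSeat(reservedSeat):
--     allCount = 0
--     for row in reservedSeat:
--         allCount += len(row)
--     return 20 - allCount
--
-- def displayReservedSeat(reservedSeat):
--     z = '\n'
--     for row in reservedSeat:
--         for seat in range(10):
--             if seat in row:
--                 z += txtColorWarning + 'X' + txtEndColor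
--             else:
--                 z += txtColorGreen + '0' + txtEndColor
--         z += '\n'
--
--     z += txtColorWarning + 'X' + txtEndColor + ': Reserved. ' + txtColorGreen + '0' + txtEndColor + ': Available. \n'
--     z += 'Remaining Seat Available: ' + str(getRemainingSeat(reservedSeat)) + '\n'
--     return z
-- ===== SOURCE B (Python) =====
-- txtColorWarning = '\033[93m'
-- txtColorGreen = '\033[92m'
-- txtEndColor = '\033[0m'
--
-- def displayReservedSeat(reservedSeat):
--     X = txtColorWarning + 'X' + txtEndColor
--     O = txtColorGreen + '0' + txtEndColor
--     z = '\n'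
--     total = 0
--     for row in reservedSeat:
--         line = [O] * 10
--         for s in row:
--             if s in range(10):
--                 line[s] = X
--         z += ''.join(line) + '\n'
--         total += len(row)
--     z += X + ': Reserved. ' + O + ': Available. \n'
--     z += 'Remaining Seat Available: ' + str(20 - total) + '\n'
--     return z
-- ===== Notes on version B (the rewrite author's own statement) =====
-- stated objective: alternative
-- what changed: Per row, B writes the reserved seats into a 10-slot marker buffer and joins it, instead of A's scan of all 10 positions with a membership test over the row each time, and B accumulates the remaining-seat total in the same pass instead of A's separate getRemainingSeat loop.
import Mathlib
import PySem

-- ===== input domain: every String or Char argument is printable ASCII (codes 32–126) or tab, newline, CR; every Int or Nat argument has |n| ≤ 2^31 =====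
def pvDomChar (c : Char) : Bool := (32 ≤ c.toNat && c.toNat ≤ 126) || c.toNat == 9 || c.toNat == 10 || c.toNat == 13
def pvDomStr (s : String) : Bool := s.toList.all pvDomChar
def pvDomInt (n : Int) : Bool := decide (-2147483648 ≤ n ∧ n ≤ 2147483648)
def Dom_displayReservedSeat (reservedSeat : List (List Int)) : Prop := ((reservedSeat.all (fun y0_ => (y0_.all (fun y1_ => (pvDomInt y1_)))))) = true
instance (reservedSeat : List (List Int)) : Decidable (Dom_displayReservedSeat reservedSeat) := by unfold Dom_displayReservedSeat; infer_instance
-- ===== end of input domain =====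

-- B replaces A's per-row scan of all 10 positions (each a membership scan of the row) by a
-- 10-slot marker buffer written once per reserved seat, and folds the remaining-seat count
-- into the same pass instead of A's second loop (objective: alternative decomposition).

def txtColorWarning : String := "\x1b[93m"
def txtColorGreen : String := "\x1b[92m"
def txtEndColor : String := "\x1b[0m"

-- ===== PORT A =====
def getRemainingSeat (reservedSeat : List (List Int)) : Int :=
  let allCount := reservedSeat.foldl (fun allCount row => allCount + PySem.List.len row) 0
  20 - allCount

def displayReservedSeat (reservedSeat : List (List Int)) : String :=
  let z := reservedSeat.foldl (fun z row =>
    ((PySem.List.pyRange 0 10 1).foldl (fun z seat =>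
      if seat ∈ row then z ++ txtColorWarning ++ "X" ++ txtEndColor
      else z ++ txtColorGreen ++ "0" ++ txtEndColor) z) ++ "\n") "\n"
  let z := z ++ (txtColorWarning ++ "X" ++ txtEndColor ++ ": Reserved. " ++ txtColorGreen ++ "0" ++ txtEndColor ++ ": Available. \n")
  let z := z ++ ("Remaining Seat Available: " ++ PySem.Int.toStr (getRemainingSeat reservedSeat) ++ "\n")
  z

-- ===== PORT B =====
def displayReservedSeat_alt (reservedSeat : List (List Int)) : String :=
  let X := txtColorWarning ++ "X" ++ txtEndColor
  let O := txtColorGreen ++ "0" ++ txtEndColor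
  let p := reservedSeat.foldl (fun (zt : String × Int) row =>
    let line := row.foldl (fun line s =>
      if 0 ≤ s ∧ s < 10 then line.set s.toNat X else line) (List.replicate 10 O)
    (zt.1 ++ (PySem.Str.join "" line ++ "\n"), zt.2 + PySem.List.len row)) ("\n", 0)
  let z := p.1 ++ (X ++ ": Reserved. " ++ O ++ ": Available. \n")
  let z := z ++ ("Remaining Seat Available: " ++ PySem.Int.toStr (20 - p.2) ++ "\n")
  z

-- ===== PRECONDITION & SPEC =====
def Spec_displayReservedSeat (reservedSeat : List (List Int)) (out : String) : Prop := out = displayReservedSeat_alt reservedSeat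
instance (reservedSeat : List (List Int)) (out : String) : Decidable (Spec_displayReservedSeat reservedSeat out) := by unfold Spec_displayReservedSeat; infer_instance

-- ===== CLAIM (what is proved, stated in full; the proofs are below) =====
def Claim_equal_displayReservedSeat : Prop := ∀ (reservedSeat : List (List Int)), Dom_displayReservedSeat reservedSeat → Spec_displayReservedSeat reservedSeat (displayReservedSeat reservedSeat)

-- ===== LEMMAS AND PROOFS =====

def pvX : String := txtColorWarning ++ "X" ++ txtEndColor
def pvO : String := txtColorGreen ++ "0" ++ txtEndColor

def pvSetRow (row : List Int) : List String :=
  row.foldl (fun line s => if 0 ≤ s ∧ s < 10 then line.set s.toNat pvX else line)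
    (List.replicate 10 pvO)

-- after processing the whole row, slot i holds pvX iff some reserved seat equals i
theorem pvSetRow_getD (row : List Int) : ∀ (line : List String), line.length = 10 →
    ∀ (i : Nat), i < 10 →
    (row.foldl (fun line s => if 0 ≤ s ∧ s < 10 then line.set s.toNat pvX else line) line).getD i ""
      = if (i : Int) ∈ row then pvX else line.getD i "" := by
  induction row with
  | nil => intro line _ i _; simp
  | cons s row ih =>
    intro line hlen i hi
    simp only [List.foldl_cons, List.mem_cons]
    by_cases hs : 0 ≤ s ∧ s < 10
    · rw [if_pos hs, ih _ (by simp [hlen]) i hi]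
      by_cases hm : (i : Int) ∈ row
      · simp [hm]
      · simp only [hm, if_false, or_false]
        by_cases he : (i : Int) = s
        · have : s.toNat = i := by omega
          subst this
          simp [List.getD, hlen, hi, he]
        · have hne : s.toNat ≠ i := by omega
          simp [List.getD, hne, he]
    · rw [if_neg hs, ih _ hlen i hi]
      have : (i : Int) ≠ s := by omega
      simp [this]

theorem pvSetRow_length (row : List Int) : ∀ line,
    (row.foldl (fun line s => if 0 ≤ s ∧ s < 10 then line.set s.toNat pvX else line)
      (line : List String)).length = line.length := by
  induction row with
  | nil => intro line; rfl
  | cons s row ih => intro line; simp only [List.foldl_cons]; split <;> simp [ih]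

def pvG (row : List Int) (i : Nat) : String := if (i : Int) ∈ row then pvX else pvO

theorem pvSetRow_eq (row : List Int) :
    pvSetRow row = [pvG row 0, pvG row 1, pvG row 2, pvG row 3, pvG row 4,
                    pvG row 5, pvG row 6, pvG row 7, pvG row 8, pvG row 9] := by
  have hlen : (pvSetRow row).length = 10 := by
    simpa using pvSetRow_length row (List.replicate 10 pvO)
  apply List.ext_getElem (by simp [hlen])
  intro i h1 h2
  have hi : i < 10 := by omega
  simp only [pvSetRow] at h1 ⊢
  rw [← List.getD_eq_getElem _ "" h1,
      pvSetRow_getD row (List.replicate 10 pvO) (by simp) i hi]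
  interval_cases i <;> simp [pvG]

-- the joined buffer equals A's ten-membership-test scan appended to z
theorem pvRow_eq (row : List Int) (z : String) :
    (PySem.List.pyRange 0 10 1).foldl (fun z seat =>
      if seat ∈ row then z ++ txtColorWarning ++ "X" ++ txtEndColor
      else z ++ txtColorGreen ++ "0" ++ txtEndColor) z
    = z ++ PySem.Str.join "" (pvSetRow row) := by
  have hr : PySem.List.pyRange 0 10 1 = [0,1,2,3,4,5,6,7,8,9] := by decide
  have step : ∀ (z' : String) (seat : Int),
      (if seat ∈ row then z' ++ txtColorWarning ++ "X" ++ txtEndColor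
       else z' ++ txtColorGreen ++ "0" ++ txtEndColor)
      = z' ++ (if seat ∈ row then pvX else pvO) := by
    intro z' seat; split <;> simp [pvX, pvO, String.append_assoc]
  have hjoin : ∀ a b c d e f g h i j : String,
      PySem.Str.join "" [a,b,c,d,e,f,g,h,i,j]
        = a++(b++(c++(d++(e++(f++(g++(h++(i++j)))))))) := by
    intros
    simp [PySem.Str.join, PySem.Chars.join, List.intercalate, List.intersperse,
      String.ofList_append, String.ofList_toList]
  rw [hr, pvSetRow_eq]
  simp only [List.foldl_cons, List.foldl_nil, step, hjoin]
  simp [pvG, String.append_assoc]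

-- the single fused pass equals A's display fold paired with A's counting fold
theorem pvOuter (reservedSeat : List (List Int)) : ∀ (z : String) (c : Int),
    reservedSeat.foldl (fun (zt : String × Int) row =>
      let line := row.foldl (fun line s =>
        if 0 ≤ s ∧ s < 10 then line.set s.toNat pvX else line) (List.replicate 10 pvO)
      (zt.1 ++ (PySem.Str.join "" line ++ "\n"), zt.2 + PySem.List.len row)) (z, c)
    = (reservedSeat.foldl (fun z row =>
        ((PySem.List.pyRange 0 10 1).foldl (fun z seat =>
          if seat ∈ row then z ++ txtColorWarning ++ "X" ++ txtEndColor
          else z ++ txtColorGreen ++ "0" ++ txtEndColor) z) ++ "\n") z,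
       reservedSeat.foldl (fun allCount row => allCount + PySem.List.len row) c) := by
  induction reservedSeat with
  | nil => intro z c; rfl
  | cons row rs ih =>
    intro z c
    simp only [List.foldl_cons]
    rw [ih, pvRow_eq]
    simp [String.append_assoc, pvSetRow]

-- ===== VERDICT (by name: the statement is the Claim_ definition above) =====
theorem displayReservedSeat_spec : Claim_equal_displayReservedSeat := by
  intro reservedSeat _
  unfold Spec_displayReservedSeat displayReservedSeat displayReservedSeat_alt getRemainingSeat
  simp only []
  rw [show (txtColorWarning ++ "X" ++ txtEndColor : String) = pvX from rfl,
      show (txtColorGreen ++ "0" ++ txtEndColor : String) = pvO from rfl]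
  rw [pvOuter reservedSeat "\n" 0]
  simp [pvX, pvO, String.append_assoc]
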